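-- pv_equiv track=rewrite | github.com/Unbabel/OpenKiwi | kiwi/runner.py | remove_empty_sentences
-- ===== SOURCE A (Python) =====
-- from typing import Any, Dict, List, Optional, Tuple
--
-- def remove_empty_sentences(
--     columns: Dict[str, List[str]]
-- ) -> Tuple[Dict[str, List[str]], List[int]]:
--     new_columns = {field: [] for field in columns}
--     empty_sentences_indices = []
--     for i, sentences in enumerate(zip(*columns.values())):
--         if any([not sentence.strip() for sentence in sentences]):
--             empty_sentences_indices.append(i)
--         else:
--             for field, sentence in zip(columns.keys(), sentences):
--                 new_columns[field].append(sentence)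
--
--     return new_columns, empty_sentences_indices
-- ===== SOURCE B (Python) =====
-- def remove_empty_sentences(columns):
--     cols = list(columns.values())
--     n = min((len(c) for c in cols), default=0)
--     bad = set()
--     for c in cols:
--         for i in range(n):
--             if not c[i].strip():
--                 bad.add(i)
--     new_columns = {
--         field: [c[i] for i in range(n) if i not in bad]
--         for field, c in columns.items()
--     }
--     return new_columns, sorted(bad)
-- ===== Notes on version B (the rewrite author's own statement) =====
-- stated objective: alternative
-- what changed: Replaced the row-wise zip-transpose with per-row dict appends by column-wise scans that precompute the set of bad row indices and then filter each column independently.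
import Mathlib
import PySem

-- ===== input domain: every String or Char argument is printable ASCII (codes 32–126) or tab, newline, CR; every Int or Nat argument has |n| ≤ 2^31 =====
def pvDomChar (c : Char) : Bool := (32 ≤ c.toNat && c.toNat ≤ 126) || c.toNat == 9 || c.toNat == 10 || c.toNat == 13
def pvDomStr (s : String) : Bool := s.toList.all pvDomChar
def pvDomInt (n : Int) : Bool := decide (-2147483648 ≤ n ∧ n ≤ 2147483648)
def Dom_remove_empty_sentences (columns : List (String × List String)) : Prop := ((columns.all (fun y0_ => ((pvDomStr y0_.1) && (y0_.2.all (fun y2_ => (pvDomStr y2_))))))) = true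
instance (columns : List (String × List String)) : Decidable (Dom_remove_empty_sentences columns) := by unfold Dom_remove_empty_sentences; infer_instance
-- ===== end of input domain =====

-- B replaces A's row-wise zip-transpose/dict-append pass by column-wise scans with a
-- precomputed set of bad row indices (objective: alternative decomposition, same cost).


-- shared helper: length of the shortest column (0 if there is none)
def pvMinLen (cols : List (List String)) : Nat :=
  match cols with
  | [] => 0
  | c :: cs => cs.foldl (fun m l => min m l.length) c.length

-- ===== PORT A =====
-- models Python's built-in zip(*cols): one row per index below the shortest column — exact
-- (c.getD i "" is in range for every i < pvMinLen cols)
def pyZipStar (cols : List (List String)) : List (List String) :=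
  (List.range (pvMinLen cols)).map (fun i => cols.map (fun c => c.getD i ""))

def remove_empty_sentences (columns : List (String × List String)) : (List (String × List String)) × List Int :=
  -- new_columns = {field: [] for field in columns}
  let new0 : PySem.Dict String (List String) :=
    columns.foldl (fun d p => d.insert p.1 ([] : List String)) PySem.Dict.empty
  -- for i, sentences in enumerate(zip(*columns.values())): …
  let res := (PySem.List.enumerate (pyZipStar (columns.map Prod.snd))).foldl
    (fun (st : PySem.Dict String (List String) × List Int) p =>
      if (p.2.map (fun s => PySem.Str.strip s == "")).any id then
        (st.1, st.2 ++ [p.1])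
      else
        (((columns.map Prod.fst).zip p.2).foldl
          (fun d q => d.modify q.1 [] (fun l => l ++ [q.2])) st.1, st.2))
    (new0, ([] : List Int))
  (res.1.items, res.2)

-- ===== PORT B =====
def remove_empty_sentences_alt (columns : List (String × List String)) : (List (String × List String)) × List Int :=
  let cols := columns.map Prod.snd
  let n := pvMinLen cols
  -- bad = set of row indices at which some column's sentence strips to empty
  -- (indices are the naturals 0..n-1; cast to Int on return — exact; c.getD i "" is in range for i < n)
  let bad : PySem.Set Nat := cols.foldl
    (fun s c => (List.range n).foldl
      (fun s i => if PySem.Str.strip (c.getD i "") == "" then PySem.Set.add s i else s) s)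
    PySem.Set.empty
  let newCols := columns.map (fun p =>
    (p.1, ((List.range n).filter (fun i => !(PySem.Set.contains bad i))).map (fun i => p.2.getD i "")))
  (newCols, (PySem.List.sorted bad (fun i => i) false).map (fun i => (i : Int)))

-- ===== PRECONDITION & SPEC =====
-- Pre_ restates the Python-dict invariant that keys are distinct: an association list with
-- duplicate keys does not denote any dict input A can receive, so nothing A returns on is excluded.
def Pre_remove_empty_sentences (columns : List (String × List String)) : Prop :=
  (columns.map Prod.fst).Nodup
instance (columns : List (String × List String)) : Decidable (Pre_remove_empty_sentences columns) := by
  unfold Pre_remove_empty_sentences; infer_instance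

def pvWitness_remove_empty_sentences : (List (String × List String)) :=
  [("a", ["x", " "]), ("b", ["y", "z"])]

def Spec_remove_empty_sentences (columns : List (String × List String)) (out : (List (String × List String)) × List Int) : Prop := out = remove_empty_sentences_alt columns
instance (columns : List (String × List String)) (out : (List (String × List String)) × List Int) : Decidable (Spec_remove_empty_sentences columns out) := by unfold Spec_remove_empty_sentences; infer_instance

-- ===== CLAIM (what is proved, stated in full; the proofs are below) =====
def Claim_equal_remove_empty_sentences : Prop := ∀ (columns : List (String × List String)), Dom_remove_empty_sentences columns → Pre_remove_empty_sentences columns → Spec_remove_empty_sentences columns (remove_empty_sentences columns)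

-- ===== LEMMAS AND PROOFS =====

-- "row i has some sentence that strips to empty"
def pvBadP (cols : List (List String)) (i : Nat) : Bool :=
  cols.any (fun c => PySem.Str.strip (c.getD i "") == "")

-- membership in an "add if condition" fold over a list of candidate indices
lemma mem_foldl_add_if (q : Nat → Bool) (l : List Nat) (s : PySem.Set Nat) (x : Nat) :
    (x ∈ l.foldl (fun s i => if q i then PySem.Set.add s i else s) s) ↔
      x ∈ s ∨ (x ∈ l ∧ q x = true) := by
  induction l generalizing s with
  | nil => simp
  | cons i t ih =>
    simp only [List.foldl_cons, List.mem_cons]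
    by_cases h : q i
    · rw [if_pos h, ih, PySem.Set.mem_add]
      constructor
      · rintro ((hs | rfl) | ht)
        · exact Or.inl hs
        · exact Or.inr ⟨Or.inl rfl, h⟩
        · exact Or.inr ⟨Or.inr ht.1, ht.2⟩
      · rintro (hs | ⟨(rfl | ht), hq⟩)
        · exact Or.inl (Or.inl hs)
        · exact Or.inl (Or.inr rfl)
        · exact Or.inr ⟨ht, hq⟩
    · rw [if_neg h, ih]
      constructor
      · rintro (hs | ht)
        · exact Or.inl hs
        · exact Or.inr ⟨Or.inr ht.1, ht.2⟩
      · rintro (hs | ⟨(rfl | ht), hq⟩)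
        · exact Or.inl hs
        · exact absurd hq h
        · exact Or.inr ⟨ht, hq⟩

lemma nodup_add (s : PySem.Set Nat) (x : Nat) (h : s.Nodup) : (PySem.Set.add s x).Nodup := by
  unfold PySem.Set.add
  split
  · exact h
  · rename_i hc
    simp only [PySem.Set.contains, List.contains_iff_mem] at hc
    rw [List.nodup_append]
    refine ⟨h, List.nodup_singleton x, ?_⟩
    intro a ha b hbx hab
    have hbxx : b = x := by simpa using hbx
    exact hc (hbxx ▸ hab ▸ ha)

lemma nodup_foldl_add_if (q : Nat → Bool) (l : List Nat) (s : PySem.Set Nat) (h : s.Nodup) :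
    (l.foldl (fun s i => if q i then PySem.Set.add s i else s) s).Nodup := by
  induction l generalizing s with
  | nil => exact h
  | cons i t ih =>
    simp only [List.foldl_cons]
    by_cases hq : q i
    · rw [if_pos hq]; exact ih _ (nodup_add _ _ h)
    · rw [if_neg hq]; exact ih _ h

-- membership in B's bad set
lemma mem_badset (cols : List (List String)) (n : Nat) (s : PySem.Set Nat) (x : Nat) :
    (x ∈ cols.foldl
        (fun s c => (List.range n).foldl
          (fun s i => if PySem.Str.strip (c.getD i "") == "" then PySem.Set.add s i else s) s)
        s) ↔ x ∈ s ∨ (x ∈ List.range n ∧ pvBadP cols x = true) := by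
  induction cols generalizing s with
  | nil => simp [pvBadP]
  | cons c t ih =>
    simp only [List.foldl_cons]
    rw [ih, mem_foldl_add_if]
    simp only [pvBadP, List.any_cons, Bool.or_eq_true]
    tauto

lemma nodup_badset (cols : List (List String)) (n : Nat) (s : PySem.Set Nat) (h : s.Nodup) :
    (cols.foldl
        (fun s c => (List.range n).foldl
          (fun s i => if PySem.Str.strip (c.getD i "") == "" then PySem.Set.add s i else s) s)
        s).Nodup := by
  induction cols generalizing s with
  | nil => exact h
  | cons c t ih => exact ih _ (nodup_foldl_add_if _ _ _ h)

-- B computes exactly the range-filter characterisation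
lemma alt_eq (columns : List (String × List String)) :
    remove_empty_sentences_alt columns =
      (columns.map (fun p => (p.1,
          ((List.range (pvMinLen (columns.map Prod.snd))).filter
            (fun i => !(pvBadP (columns.map Prod.snd) i))).map (fun i => p.2.getD i ""))),
       ((List.range (pvMinLen (columns.map Prod.snd))).filter
          (pvBadP (columns.map Prod.snd))).map (fun i => (i : Int))) := by
  simp only [remove_empty_sentences_alt]
  set cols := columns.map Prod.snd with hcols
  set n := pvMinLen cols with hn
  set bad := cols.foldl
      (fun s c => (List.range n).foldl
        (fun s i => if PySem.Str.strip (c.getD i "") == "" then PySem.Set.add s i else s) s)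
      PySem.Set.empty with hbad
  have hmem : ∀ x, x ∈ bad ↔ x ∈ List.range n ∧ pvBadP cols x = true := by
    intro x; rw [hbad, mem_badset]; simp [PySem.Set.empty]
  have hnd : bad.Nodup := nodup_badset cols n _ (by simp [PySem.Set.empty])
  rw [Prod.mk.injEq]
  constructor
  · -- dict part
    apply List.map_congr_left
    intro p _
    congr 1
    congr 1
    apply List.filter_congr
    intro i hi
    have hco : (PySem.Set.contains bad i) = pvBadP cols i := by
      cases hpb : pvBadP cols i with
      | true =>
        have hm : i ∈ bad := (hmem i).mpr ⟨hi, hpb⟩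
        simpa [PySem.Set.contains, List.contains_iff_mem] using hm
      | false =>
        have hm : i ∉ bad := fun hmm => by simp [((hmem i).mp hmm).2] at hpb
        have hnc : ¬ (PySem.Set.contains bad i = true) := by
          simpa [PySem.Set.contains, List.contains_iff_mem] using hm
        simpa [Bool.not_eq_true] using hnc
    rw [hco]
  · -- indices part
    have hs : PySem.List.sorted bad (fun i => i) = (List.range n).filter (pvBadP cols) := by
      apply PySem.List.sorted_eq_of_perm_of_pairwise_lt
      · rw [List.perm_ext_iff_of_nodup (List.Nodup.filter _ (List.nodup_range)) hnd]
        intro a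
        rw [hmem a, List.mem_filter]
      · exact List.Pairwise.filter _ (List.pairwise_lt_range)
    rw [hs]

-- a modify at a key different from the head key passes over the head entry
lemma modify_cons_ne (k : String) (w : List String) (rest : List (String × List String))
    (k' : String) (f : List String → List String) (h : k' ≠ k) :
    PySem.Dict.modify (PySem.Dict.mk ((k, w) :: rest)) k' ([] : List String) f
      = PySem.Dict.mk ((k, w) :: (PySem.Dict.modify (PySem.Dict.mk rest) k' ([] : List String) f).items) := by
  have hkk : (k == k') = false := by simp [h.symm]
  simp only [PySem.Dict.modify, PySem.Dict.insert, PySem.Dict.contains, PySem.Dict.getD,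
    PySem.Dict.get?, List.any_cons, hkk, Bool.false_or, List.find?_cons, List.map_cons]
  by_cases hc : rest.any (fun p => p.1 == k') = true
  · simp [hc]
  · simp [hc]

-- a fold of modifies whose keys all differ from the head key passes over the head entry
lemma foldl_modify_cons (qs : List (String × String)) (k : String) (w : List String)
    (rest : List (String × List String)) (hq : ∀ q ∈ qs, q.1 ≠ k) :
    qs.foldl (fun d q => d.modify q.1 [] (fun l => l ++ [q.2])) (PySem.Dict.mk ((k, w) :: rest))
      = PySem.Dict.mk ((k, w) ::
          (qs.foldl (fun d q => d.modify q.1 [] (fun l => l ++ [q.2])) (PySem.Dict.mk rest)).items) := by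
  induction qs generalizing rest with
  | nil => rfl
  | cons q t ih =>
    simp only [List.foldl_cons]
    rw [modify_cons_ne _ _ _ _ _ (hq q (List.mem_cons_self))]
    exact ih _ (fun q hqt => hq q (List.mem_cons_of_mem _ hqt))

-- distributing one row across a dict with exactly those (distinct) keys appends pointwise
lemma distribute_row (its : List (String × List String)) (row : List String)
    (hn : (its.map Prod.fst).Nodup) (hl : row.length = its.length) :
    ((its.map Prod.fst).zip row).foldl
        (fun d q => d.modify q.1 [] (fun l => l ++ [q.2])) (PySem.Dict.mk its)
      = PySem.Dict.mk ((its.zip row).map (fun q => (q.1.1, q.1.2 ++ [q.2]))) := by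
  induction its generalizing row with
  | nil =>
    have : row = [] := List.length_eq_zero_iff.mp hl
    subst this; rfl
  | cons p rest ih =>
    obtain ⟨k, v⟩ := p
    cases row with
    | nil => simp at hl
    | cons s rs =>
      simp only [List.map_cons, List.zip_cons_cons, List.foldl_cons] at *
      have hk : k ∉ rest.map Prod.fst := (List.nodup_cons.mp hn).1
      have hstep :
          PySem.Dict.modify (PySem.Dict.mk ((k, v) :: rest)) k ([] : List String) (fun l => l ++ [s])
            = PySem.Dict.mk ((k, v ++ [s]) :: rest) := by
        have hrest : rest.map (fun p => if p.1 = k then (k, v ++ [s]) else p) = rest := by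
          conv_rhs => rw [← List.map_id rest]
          apply List.map_congr_left
          intro p hp
          have hne : p.1 ≠ k := fun he => hk (he ▸ List.mem_map_of_mem hp)
          simp [hne]
        simp [PySem.Dict.modify, PySem.Dict.getD, PySem.Dict.get?, PySem.Dict.insert,
          PySem.Dict.contains, hrest]
      rw [hstep]
      rw [foldl_modify_cons _ _ _ _ (by
        intro q hqmem
        have := (List.of_mem_zip hqmem).1
        intro he; exact hk (he ▸ this))]
      rw [ih rs (List.nodup_cons.mp hn).2 (by simpa using hl)]

-- filling the fresh keys of "new_columns = {field: [] for field in columns}"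
lemma new0_eq (cs : List (String × List String)) (d : PySem.Dict String (List String))
    (h : ∀ p ∈ cs, p.1 ∉ d.items.map Prod.fst) (hnd : (cs.map Prod.fst).Nodup) :
    cs.foldl (fun d p => d.insert p.1 ([] : List String)) d
      = PySem.Dict.mk (d.items ++ cs.map (fun p => (p.1, ([] : List String)))) := by
  induction cs generalizing d with
  | nil => simp
  | cons p rest ih =>
    simp only [List.foldl_cons]
    have hc : d.contains p.1 = false := by
      simp only [PySem.Dict.contains, List.any_eq_false]
      intro q hq
      have hqm : q.1 ∈ d.items.map Prod.fst := List.mem_map_of_mem hq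
      intro he
      exact h p List.mem_cons_self ((eq_of_beq he) ▸ hqm)
    have hins : d.insert p.1 ([] : List String) = PySem.Dict.mk (d.items ++ [(p.1, [])]) := by
      simp [PySem.Dict.insert, hc]
    rw [hins, ih]
    · simp
    · intro q hq
      simp only [List.map_append, List.mem_append, List.map_cons]
      rintro (hmem | hmem)
      · exact h q (List.mem_cons_of_mem _ hq) hmem
      · simp only [List.map_nil, List.mem_cons, List.not_mem_nil, or_false] at hmem
        have : q.1 ∈ rest.map Prod.fst := List.mem_map_of_mem hq
        exact (List.nodup_cons.mp hnd).1 (hmem ▸ this)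
    · exact (List.nodup_cons.mp hnd).2

-- the main loop of A, characterised row by row
lemma a_fold (columns : List (String × List String)) (hnd : (columns.map Prod.fst).Nodup)
    (m : Nat) :
    (PySem.List.enumerate
        ((List.range m).map (fun i => (columns.map Prod.snd).map (fun c => c.getD i "")))).foldl
      (fun (st : PySem.Dict String (List String) × List Int) p =>
        if (p.2.map (fun s => PySem.Str.strip s == "")).any id then
          (st.1, st.2 ++ [p.1])
        else
          (((columns.map Prod.fst).zip p.2).foldl
            (fun d q => d.modify q.1 [] (fun l => l ++ [q.2])) st.1, st.2))
      (PySem.Dict.mk (columns.map (fun p => (p.1, ([] : List String)))), ([] : List Int))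
    = (PySem.Dict.mk (columns.map (fun p => (p.1,
          ((List.range m).filter (fun i => !(pvBadP (columns.map Prod.snd) i))).map
            (fun i => p.2.getD i "")))),
       ((List.range m).filter (pvBadP (columns.map Prod.snd))).map (fun i => (i : Int))) := by
  induction m with
  | zero => simp
  | succ m ih =>
    rw [List.range_succ, List.map_append, PySem.List.enumerate_append, List.foldl_append, ih]
    simp only [List.map_cons, List.map_nil, List.length_map, List.length_range,
      PySem.List.enumerate, List.foldl_cons, List.foldl_nil]
    have hcond : (((columns.map Prod.snd).map (fun c => c.getD m "")).map
        (fun s => PySem.Str.strip s == "")).any id = pvBadP (columns.map Prod.snd) m := by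
      simp [pvBadP, List.any_map]
      rfl
    by_cases hb : pvBadP (columns.map Prod.snd) m
    · rw [if_pos (by rw [hcond]; exact hb)]
      rw [List.filter_append, List.filter_append]
      simp [hb]
    · rw [if_neg (by rw [hcond]; simp [hb])]
      rw [List.filter_append, List.filter_append]
      have hrow : (columns.map Prod.snd).map (fun c => c.getD m "")
          = columns.map (fun p => p.2.getD m "") := by
        rw [List.map_map]; rfl
      have hkeys : (columns.map (fun p => (p.1,
            ((List.range m).filter (fun i => !(pvBadP (columns.map Prod.snd) i))).map
              (fun i => p.2.getD i "")))).map Prod.fst = columns.map Prod.fst := by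
        rw [List.map_map]; rfl
      rw [hrow]
      rw [show columns.map Prod.fst = (columns.map (fun p => (p.1,
            ((List.range m).filter (fun i => !(pvBadP (columns.map Prod.snd) i))).map
              (fun i => p.2.getD i "")))).map Prod.fst from hkeys.symm]
      rw [distribute_row _ _ (by rw [hkeys]; exact hnd) (by simp)]
      simp only [hb, List.filter_cons, List.filter_nil, Bool.not_false]
      congr 1
      · congr 1
        rw [List.zip_map']
        rw [List.map_map]
        apply List.map_congr_left
        intro p _
        simp
      · simp

theorem remove_empty_sentences_spec : Claim_equal_remove_empty_sentences := by
  intro columns _ hpre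
  unfold Spec_remove_empty_sentences
  unfold Pre_remove_empty_sentences at hpre
  rw [alt_eq]
  unfold remove_empty_sentences
  simp only
  rw [new0_eq columns PySem.Dict.empty (by simp [PySem.Dict.empty]) hpre]
  simp only [PySem.Dict.empty, List.nil_append]
  unfold pyZipStar
  rw [a_fold columns hpre (pvMinLen (columns.map Prod.snd))]
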